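-- pv_equiv track=rewrite | github.com/cgnl/mulle.js | tools/build_scripts/score/marker_audio_map.py | infer_linear_bases
-- ===== SOURCE A (Python) =====
-- from collections import defaultdict
-- from typing import Dict, List, Optional, Tuple
--
-- def infer_linear_bases(values: List[int], audio_members: Dict[int, str], a_candidates: List[int]) -> Tuple[int, List[int], Dict[int, int]]:
--     """
--     Infer a linear encoding v = a * member + b. Returns:
--     - best a
--     - candidate b list (sorted by frequency)
--     - b frequency map
--     """
--     audio_member_nums = list(audio_members.keys())
--     best = (0, None, [])  # matches, a, b_list
--     best_b_freq = {}
--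
--     for a in a_candidates:
--         b_counts = defaultdict(int)
--         for v in values:
--             for m in audio_member_nums:
--                 b = v - a * m
--                 b_counts[b] += 1
--
--         # Keep b values that occur at least twice (noise filter)
--         b_sorted = sorted(b_counts.items(), key=lambda x: (-x[1], x[0]))
--         b_candidates = [b for b, cnt in b_sorted if cnt >= 2]
--         if not b_candidates:
--             continue
--
--         # Measure match count using these b candidates
--         matches = 0
--         for v in values:
--             for b in b_candidates:
--                 if (v - b) % a != 0:
--                     continue
--                 member = (v - b) // a
--                 if member in audio_members:
--                     matches += 1
--                     break
--
--         if matches > best[0]: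
--             best = (matches, a, b_candidates)
--             best_b_freq = dict(b_counts)
--
--     return best[1], best[2], best_b_freq
-- ===== SOURCE B (Python) =====
-- from collections import Counter
--
--
-- def infer_linear_bases(values, audio_members, a_candidates):
--     """Staged re-implementation: each candidate a is evaluated independently
--     (frequencies via one Counter over the flattened difference list, match count
--     via a precomputed set of reachable targets a*m+b), then the best result is selected in a final pass."""
--     member_nums = list(audio_members.keys())
--
--     def evaluate(a):
--         diffs = [v - a * m for v in values for m in member_nums]
--         items = list(Counter(diffs).items())
--         ranked = sorted(items, key=lambda x: (-x[1], x[0]))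
--         cands = [b for b, cnt in ranked if cnt >= 2]
--         if not cands:
--             return None
--         targets = {a * m + b for m in member_nums for b in cands}
--         score = len([v for v in values if v in targets])
--         return (score, a, cands, items)
--
--     results = [r for r in (evaluate(a) for a in a_candidates) if r is not None]
--     best = None
--     for r in results:
--         if best is None or r[0] > best[0]:
--             best = r
--     if best is None or best[0] <= 0:
--         return None, [], {}
--     return best[1], best[2], dict(best[3])
-- ===== Notes on version B (the rewrite author's own statement) =====
-- stated objective: alternative
-- what changed: B is staged instead of accumulating: per-a evaluation is a pure function (frequency table built by one Counter over the flattened difference list instead of a mutated defaultdict in nested loops, matches counted by membership in a precomputed set of reachable targets a*m+b instead of a per-value divide-and-scan loop), and the best candidate is picked by a separate final selection pass instead of A's in-loop best-state updates.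
import Mathlib
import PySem

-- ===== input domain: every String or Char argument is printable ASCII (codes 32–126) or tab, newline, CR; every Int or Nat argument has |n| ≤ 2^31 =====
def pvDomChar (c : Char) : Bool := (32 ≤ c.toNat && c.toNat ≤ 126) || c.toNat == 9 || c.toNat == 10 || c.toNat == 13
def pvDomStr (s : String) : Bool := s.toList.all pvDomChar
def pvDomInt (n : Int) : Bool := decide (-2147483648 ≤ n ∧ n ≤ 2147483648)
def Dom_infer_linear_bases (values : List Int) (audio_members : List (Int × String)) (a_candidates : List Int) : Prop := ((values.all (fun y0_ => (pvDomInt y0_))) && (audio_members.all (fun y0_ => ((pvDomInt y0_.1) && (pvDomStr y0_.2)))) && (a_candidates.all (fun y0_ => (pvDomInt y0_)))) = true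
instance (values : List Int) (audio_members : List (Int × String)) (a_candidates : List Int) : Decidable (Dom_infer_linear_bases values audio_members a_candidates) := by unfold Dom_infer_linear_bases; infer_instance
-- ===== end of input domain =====

-- B restructures A: each a is scored by a pure staged evaluation (ordered dedup + count
-- for frequencies, membership in a precomputed target set {a*m+b} for matches) and the
-- best result is chosen in a separate final selection pass (objective: alternative).

-- ===== PORT A =====
-- inner loop 'for b in b_candidates: … break' of A's match phase
def pvMatchScanA (a : Int) (d : PySem.Dict Int String) (v : Int) : List Int → Bool
  | [] => false
  | b :: rest =>
    if PySem.Int.mod (v - b) a ≠ 0 then pvMatchScanA a d v rest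
    else if d.contains (PySem.Int.floordiv (v - b) a) then true
    else pvMatchScanA a d v rest

-- body of A's 'for a in a_candidates' loop; state = (best, best_b_freq)
def pvStepA (values : List Int) (d : PySem.Dict Int String) (member_nums : List Int)
    (st : (Int × Option Int × List Int) × List (Int × Int)) (a : Int) :
    (Int × Option Int × List Int) × List (Int × Int) :=
  let b_counts := values.foldl
    (fun dd v => member_nums.foldl (fun dd m => dd.modify (v - a * m) 0 (· + 1)) dd)
    PySem.Dict.empty
  let b_sorted := PySem.List.sorted2 b_counts.items (fun x => -x.2) (fun x => x.1)
  let b_candidates := (b_sorted.filter (fun x => decide ((2:Int) ≤ x.2))).map (fun x => x.1)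
  if b_candidates = [] then st
  else
    let nmatches := values.foldl (fun n v => if pvMatchScanA a d v b_candidates then n + 1 else n) (0 : Int)
    if nmatches > st.1.1 then ((nmatches, some a, b_candidates), b_counts.items) else st

def infer_linear_bases (values : List Int) (audio_members : List (Int × String)) (a_candidates : List Int) : Option Int × List Int × (List (Int × Int)) :=
  let d := PySem.Dict.ofList audio_members
  let audio_member_nums := d.keys
  let fin := a_candidates.foldl (pvStepA values d audio_member_nums) ((0, none, []), [])
  (fin.1.2.1, fin.1.2.2, fin.2)

-- ===== PORT B =====
-- B's 'evaluate(a)': none when no b occurs twice, else (score, a, cands, items)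
def pvEval (values member_nums : List Int) (a : Int) :
    Option (Int × Int × List Int × List (Int × Int)) :=
  let diffs := values.flatMap (fun v => member_nums.map (fun m => v - a * m))
  let items := (PySem.Dict.counter diffs).items
  let ranked := PySem.List.sorted2 items (fun x => -x.2) (fun x => x.1)
  let cands := (ranked.filter (fun x => decide ((2:Int) ≤ x.2))).map (fun x => x.1)
  if cands = [] then none
  else
    let targets := PySem.Set.ofList (member_nums.flatMap (fun m => cands.map (fun b => a * m + b)))
    some (((values.filter (fun v => targets.contains v)).length : Int), a, cands, items)

-- B's final selection pass over the result list
def pvBetter (best : Option (Int × Int × List Int × List (Int × Int)))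
    (r : Int × Int × List Int × List (Int × Int)) :
    Option (Int × Int × List Int × List (Int × Int)) :=
  match best with
  | none => some r
  | some b => if r.1 > b.1 then some r else some b

def infer_linear_bases_alt (values : List Int) (audio_members : List (Int × String)) (a_candidates : List Int) : Option Int × List Int × (List (Int × Int)) :=
  let member_nums := (PySem.Dict.ofList audio_members).keys
  let results := (a_candidates.map (pvEval values member_nums)).filterMap id
  match results.foldl pvBetter none with
  | none => (none, [], [])
  | some (s, a, c, it) => if s ≤ 0 then (none, [], []) else (some a, c, (PySem.Dict.ofList it).items)

-- ===== PRECONDITION & SPEC =====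
-- Pre_ excludes exactly the inputs on which A raises ZeroDivisionError: 0 among the a
-- candidates while some b value occurs at least twice (i.e. values and members nonempty,
-- and either ≥ 2 distinct member keys or a duplicated value).
def Pre_infer_linear_bases (values : List Int) (audio_members : List (Int × String)) (a_candidates : List Int) : Prop :=
  (0 : Int) ∈ a_candidates →
    (values = [] ∨ audio_members = [] ∨
      ((PySem.Dict.ofList audio_members).keys.length = 1 ∧ values.Nodup))
instance (values : List Int) (audio_members : List (Int × String)) (a_candidates : List Int) : Decidable (Pre_infer_linear_bases values audio_members a_candidates) := by unfold Pre_infer_linear_bases; infer_instance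

def pvWitness_infer_linear_bases : List Int × (List (Int × String)) × List Int :=
  ([1, 2, 5], [(1, "m"), (2, "n")], [2, 3])

def Spec_infer_linear_bases (values : List Int) (audio_members : List (Int × String)) (a_candidates : List Int) (out : Option Int × List Int × (List (Int × Int))) : Prop := out = infer_linear_bases_alt values audio_members a_candidates
instance (values : List Int) (audio_members : List (Int × String)) (a_candidates : List Int) (out : Option Int × List Int × (List (Int × Int))) : Decidable (Spec_infer_linear_bases values audio_members a_candidates out) := by unfold Spec_infer_linear_bases; infer_instance

-- ===== CLAIM (what is proved, stated in full; the proofs are below) =====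
def Claim_equal_infer_linear_bases : Prop := ∀ (values : List Int) (audio_members : List (Int × String)) (a_candidates : List Int), Dom_infer_linear_bases values audio_members a_candidates → Pre_infer_linear_bases values audio_members a_candidates → Spec_infer_linear_bases values audio_members a_candidates (infer_linear_bases values audio_members a_candidates)

-- ===== LEMMAS AND PROOFS =====

-- B's candidate list for one a (used only by the proofs)
def pvDiffs (values member_nums : List Int) (a : Int) : List Int :=
  values.flatMap (fun v => member_nums.map (fun m => v - a * m))

def pvItems (values member_nums : List Int) (a : Int) : List (Int × Int) :=
  (PySem.Dict.counter (pvDiffs values member_nums a)).items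

def pvBC (values member_nums : List Int) (a : Int) : List Int :=
  ((PySem.List.sorted2 (pvItems values member_nums a) (fun x => -x.2) (fun x => x.1)).filter
    (fun x => decide ((2:Int) ≤ x.2))).map (fun x => x.1)

-- the invariant tying A's running best state to B's running selection
def pvInv (stA : (Int × Option Int × List Int) × List (Int × Int))
    (b : Option (Int × Int × List Int × List (Int × Int))) : Prop :=
  match b with
  | none => stA = ((0, (none : Option Int), []), [])
  | some (s, a, c, it) =>
      0 ≤ s ∧ (it.map Prod.fst).Nodup ∧
      (s = 0 → stA = ((0, none, []), [])) ∧
      (0 < s → stA = ((s, some a, c), it))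

theorem pvCounts_eq (values member_nums : List Int) (a : Int) :
    values.foldl
      (fun dd v => member_nums.foldl (fun dd m => dd.modify (v - a * m) 0 (· + 1)) dd)
      PySem.Dict.empty
    = PySem.Dict.counter (pvDiffs values member_nums a) := by
  rw [pvDiffs, PySem.Dict.counter_eq_foldl, List.foldl_flatMap]
  simp [List.foldl_map]

theorem pvItemsA_eq (values member_nums : List Int) (a : Int) :
    (values.foldl
      (fun dd v => member_nums.foldl (fun dd m => dd.modify (v - a * m) 0 (· + 1)) dd)
      PySem.Dict.empty).items = pvItems values member_nums a := by
  rw [pvCounts_eq, pvItems]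

theorem pvBC_zero_nil (values : List Int) (member_nums : List Int)
    (h : values = [] ∨ member_nums = [] ∨ (member_nums.length = 1 ∧ values.Nodup)) :
    pvBC values member_nums 0 = [] := by
  unfold pvBC
  have hle : ∀ b : Int, (pvDiffs values member_nums 0).count b ≤ 1 := by
    intro b
    rcases h with h | h | ⟨h1, h2⟩
    · simp [h, pvDiffs]
    · subst h
      have hnil : pvDiffs values ([] : List Int) 0 = [] := by
        unfold pvDiffs; induction values <;> simp_all
      rw [hnil]; simp
    · rcases List.length_eq_one_iff.mp h1 with ⟨m, rfl⟩
      have hmap : pvDiffs values [m] 0 = values := by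
        unfold pvDiffs; simp
      rw [hmap]
      exact List.nodup_iff_count_le_one.mp h2 b
  have hfil : (PySem.List.sorted2 (pvItems values member_nums 0) (fun x => -x.2) (fun x => x.1)).filter
      (fun x => decide ((2:Int) ≤ x.2)) = [] := by
    rw [List.filter_eq_nil_iff]
    intro p hp
    have hp' := (PySem.List.sorted2_perm _ _ _ _).mem_iff.mp hp
    rw [pvItems, PySem.Dict.items_counter] at hp'
    rcases List.mem_map.mp hp' with ⟨k, _, rfl⟩
    have := hle k
    simp only [decide_eq_true_eq]
    omega
  rw [hfil]
  simp

theorem pvScan_eq_mem (a : Int) (ha : a ≠ 0) (d : PySem.Dict Int String) (bcands : List Int) (v : Int) :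
    pvMatchScanA a d v bcands
    = (PySem.Set.ofList (d.keys.flatMap (fun m => bcands.map (fun b => a * m + b)))).contains v := by
  rw [Bool.eq_iff_iff]
  rw [PySem.Set.contains_iff, PySem.Set.mem_ofList]
  constructor
  · intro hscan
    induction bcands with
    | nil => simp [pvMatchScanA] at hscan
    | cons b rest ih =>
      rw [pvMatchScanA] at hscan
      split_ifs at hscan with h1 h2
      · rcases List.mem_flatMap.mp (ih hscan) with ⟨m, hm, hv⟩
        exact List.mem_flatMap.mpr ⟨m, hm, by
          rcases List.mem_map.mp hv with ⟨b', hb', rfl⟩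
          exact List.mem_map.mpr ⟨b', List.mem_cons_of_mem _ hb', rfl⟩⟩
      · have hmod : PySem.Int.mod (v - b) a = 0 := by
          by_contra hc; exact h1 hc
        have hq := PySem.Int.floordiv_mul_add_mod (v - b) a
        rw [hmod, add_zero] at hq
        refine List.mem_flatMap.mpr ⟨PySem.Int.floordiv (v - b) a,
          (PySem.Dict.contains_iff_mem_keys _ _).mp h2,
          List.mem_map.mpr ⟨b, List.mem_cons_self, ?_⟩⟩
        linarith [hq]
      · rcases List.mem_flatMap.mp (ih hscan) with ⟨m, hm, hv⟩
        rcases List.mem_map.mp hv with ⟨b', hb', rfl⟩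
        exact List.mem_flatMap.mpr ⟨m, hm, List.mem_map.mpr ⟨b', List.mem_cons_of_mem _ hb', rfl⟩⟩
  · intro hv
    rcases List.mem_flatMap.mp hv with ⟨m, hm, hv'⟩
    rcases List.mem_map.mp hv' with ⟨b, hb, rfl⟩
    clear hv hv'
    induction bcands with
    | nil => simp at hb
    | cons b0 rest ih =>
      rw [pvMatchScanA]
      rcases List.mem_cons.mp hb with rfl | hb'
      · have hmod : PySem.Int.mod (a * m + b - b) a = 0 := by
          rw [PySem.Int.mod_eq_zero_iff_dvd]
          exact ⟨m, by ring⟩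
        have hq := PySem.Int.floordiv_mul_add_mod (a * m + b - b) a
        rw [hmod, add_zero] at hq
        have hfd : PySem.Int.floordiv (a * m + b - b) a = m := by
          have : PySem.Int.floordiv (a * m + b - b) a * a = m * a := by linarith [hq]
          exact mul_right_cancel₀ ha this
        rw [if_neg (by simpa using hmod), hfd,
          if_pos ((PySem.Dict.contains_iff_mem_keys _ _).mpr hm)]
      · have := ih hb'
        split_ifs with h1 h2 <;> simp_all

-- A's counting loop equals B's filter-length
theorem pvFoldCount (values : List Int) (p : Int → Bool) : ∀ n : Int,
    values.foldl (fun n v => if p v then n + 1 else n) n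
      = n + ((values.filter p).length : Int) := by
  induction values with
  | nil => intro n; simp
  | cons v t ih =>
    intro n
    by_cases hp : p v
    · simp [hp, ih]; ring
    · simp [hp, ih]

-- abstract form of one accepted step: both sides update from (score, a, cands, items)
theorem pvInv_step_abs (s : Int) (hs0 : 0 ≤ s) (a : Int) (c : List Int)
    (it : List (Int × Int)) (hnd : (it.map Prod.fst).Nodup)
    (stA : (Int × Option Int × List Int) × List (Int × Int))
    (b : Option (Int × Int × List Int × List (Int × Int))) (hinv : pvInv stA b) :
    pvInv (if s > stA.1.1 then ((s, some a, c), it) else stA) (pvBetter b (s, a, c, it)) := by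
  match b, hinv with
  | none, hinv =>
    rw [hinv]
    unfold pvBetter pvInv
    by_cases h : s > (0 : Int)
    · rw [if_pos h]
      exact ⟨hs0, hnd, by intro h0; omega, fun _ => rfl⟩
    · rw [if_neg h]
      exact ⟨hs0, hnd, fun _ => rfl, by intro h1; exact absurd h1 h⟩
  | some (s0, a0, c0, it0), hinv =>
    obtain ⟨h1, h2, h3, h4⟩ := hinv
    unfold pvBetter pvInv
    dsimp only
    by_cases hcmp : s > s0
    · rw [if_pos hcmp]
      have hspos : (0 : Int) < s := lt_of_le_of_lt h1 hcmp
      have hApos : s > stA.1.1 := by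
        rcases lt_or_eq_of_le h1 with h | h
        · rw [h4 h]; exact hcmp
        · rw [h3 h.symm]; exact hspos
      rw [if_pos hApos]
      exact ⟨le_of_lt hspos, hnd, fun h0 => by omega, fun _ => rfl⟩
    · rw [if_neg hcmp]
      have hAne : ¬ s > stA.1.1 := by
        rcases lt_or_eq_of_le h1 with h | h
        · rw [h4 h]; omega
        · rw [h3 h.symm]; show ¬ (0 : Int) < s; omega
      rw [if_neg hAne]
      exact ⟨h1, h2, h3, h4⟩

-- one step preserves the invariant
theorem pvStep_inv (values : List Int) (d : PySem.Dict Int String) (a : Int)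
    (h0 : a = 0 → pvBC values d.keys 0 = [])
    (stA : (Int × Option Int × List Int) × List (Int × Int))
    (b : Option (Int × Int × List Int × List (Int × Int))) (hinv : pvInv stA b) :
    pvInv (pvStepA values d d.keys stA a)
      (match pvEval values d.keys a with
       | none => b
       | some r => pvBetter b r) := by
  simp only [pvStepA, pvEval]
  rw [pvItemsA_eq]
  unfold pvItems pvDiffs
  by_cases hC : pvBC values d.keys a = []
  · have hC' := hC
    unfold pvBC pvItems pvDiffs at hC'
    simp only [hC', reduceIte]
    exact hinv
  · have ha : a ≠ 0 := fun h => hC (h ▸ h0 h)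
    have hC' := hC
    unfold pvBC pvItems pvDiffs at hC'
    rw [if_neg hC', if_neg hC']
    have hm : values.foldl (fun n v => if pvMatchScanA a d v (pvBC values d.keys a) then n + 1 else n) (0 : Int)
        = ((values.filter (fun v => (PySem.Set.ofList (d.keys.flatMap
            (fun m => (pvBC values d.keys a).map (fun b => a * m + b)))).contains v)).length : Int) := by
      have hcnt := pvFoldCount values
        (fun v => (PySem.Set.ofList (d.keys.flatMap
          (fun m => (pvBC values d.keys a).map (fun b => a * m + b)))).contains v) 0
      rw [zero_add] at hcnt
      rw [← hcnt]
      apply PySem.List.foldl_congr_mem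
      intro acc x _
      rw [pvScan_eq_mem a ha]
    unfold pvBC pvItems pvDiffs at hm
    rw [hm]
    refine pvInv_step_abs _ (Int.natCast_nonneg _) _ _ _ ?_ stA b hinv
    have hk := PySem.Dict.nodup_keys_counter (values.flatMap (fun v => d.keys.map (fun m => v - a * m)))
    simpa [PySem.Dict.keys] using hk

theorem pvFold_inv (values : List Int) (d : PySem.Dict Int String) :
    ∀ (cands : List Int), ((0:Int) ∈ cands → pvBC values d.keys 0 = []) →
    ∀ stA b, pvInv stA b →
    pvInv (cands.foldl (pvStepA values d d.keys) stA)
      (((cands.map (pvEval values d.keys)).filterMap id).foldl pvBetter b) := by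
  intro cands
  induction cands with
  | nil => intro _ stA b h; exact h
  | cons a t ih =>
    intro h0 stA b hinv
    have hstep := pvStep_inv values d a (fun h => h0 (h ▸ List.mem_cons_self)) stA b hinv
    simp only [List.map_cons, List.filterMap_cons, List.foldl_cons, id]
    cases hE : pvEval values d.keys a with
    | none =>
      rw [hE] at hstep
      exact ih (fun h => h0 (List.mem_cons_of_mem _ h)) _ _ hstep
    | some r =>
      rw [hE] at hstep
      exact ih (fun h => h0 (List.mem_cons_of_mem _ h)) _ _ hstep

-- a dict built from an assoc list with distinct keys lists exactly those items
theorem pvItems_ofList (l : List (Int × Int)) (hnd : (l.map Prod.fst).Nodup) :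
    (PySem.Dict.ofList l).items = l := by
  have h1 : PySem.Dict.ofList l
      = l.foldl (fun d p => d.insert p.1 p.2) PySem.Dict.empty := rfl
  rw [h1, PySem.Dict.items_foldl_insert_fresh _ _ _ _ (by simp) hnd]
  simp [PySem.Dict.empty]

-- ===== VERDICT (by name: the statement is the Claim_ definition above) =====
theorem infer_linear_bases_spec : Claim_equal_infer_linear_bases := by
  intro values audio_members a_candidates _ hpre
  unfold Spec_infer_linear_bases
  set d := PySem.Dict.ofList audio_members with hd
  simp only [infer_linear_bases, infer_linear_bases_alt, ← hd]
  have h0 : (0 : Int) ∈ a_candidates → pvBC values d.keys 0 = [] := by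
    intro hmem
    apply pvBC_zero_nil
    rcases hpre hmem with h | h | h
    · exact Or.inl h
    · right; left; simp [hd, h, PySem.Dict.ofList]
      rfl
    · exact Or.inr (Or.inr h)
  have hfin := pvFold_inv values d a_candidates h0 ((0, none, []), []) none rfl
  cases hB : ((a_candidates.map (pvEval values d.keys)).filterMap id).foldl pvBetter none with
  | none =>
    rw [hB] at hfin
    unfold pvInv at hfin
    rw [hfin]
  | some r =>
    obtain ⟨s, a, c, it⟩ := r
    rw [hB] at hfin
    obtain ⟨h1, h2, h3, h4⟩ := hfin
    by_cases hz : s ≤ 0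
    · have hs : s = 0 := by omega
      rw [h3 hs]
      simp only [if_pos hz]
    · have hpos : 0 < s := by omega
      rw [h4 hpos]
      simp only [if_neg hz]
      rw [pvItems_ofList it h2]
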